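-- pv_equiv track=rewrite | github.com/TaeUkChu/Coding-Test-Zip | code_kes/0503.py | solution
-- ===== SOURCE A (Python) =====
-- def solution(sizes):
--     answer = 0
--
--     width = []
--     hight = []
--
--     for i in sizes:
--         width.append(i[0])
--         hight.append(i[1])
--
--     max_length = max(max(width), max(hight)) # 참고 코드1
--
--     if max_length in width: # 참고 코드2
--         for i in range(len(width)):
--              if width[i] < hight[i]:
--                 width[i], hight[i] = hight[i], width[i]
--
--         answer = max_length * max(hight)
--
--     elif max_length in hight:
--         for i in range(len(width)):
--              if width[i] > hight[i]:
--                 width[i], hight[i] = hight[i], width[i]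
--
--         answer = max_length * max(width)
--
--     return answer
-- ===== SOURCE B (Python) =====
-- def solution(sizes):
--     max_long = max(max(a[0], a[1]) for a in sizes)
--     max_short = max(min(a[0], a[1]) for a in sizes)
--     return max_long * max_short
-- ===== Notes on version B (the rewrite author's own statement) =====
-- stated objective: simpler
-- what changed: B drops the parallel width/height lists, the global-max membership test and the conditional swap loops, and instead takes two direct reductions: the maximum long side (max per pair) times the maximum short side (min per pair).
import Mathlib
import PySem

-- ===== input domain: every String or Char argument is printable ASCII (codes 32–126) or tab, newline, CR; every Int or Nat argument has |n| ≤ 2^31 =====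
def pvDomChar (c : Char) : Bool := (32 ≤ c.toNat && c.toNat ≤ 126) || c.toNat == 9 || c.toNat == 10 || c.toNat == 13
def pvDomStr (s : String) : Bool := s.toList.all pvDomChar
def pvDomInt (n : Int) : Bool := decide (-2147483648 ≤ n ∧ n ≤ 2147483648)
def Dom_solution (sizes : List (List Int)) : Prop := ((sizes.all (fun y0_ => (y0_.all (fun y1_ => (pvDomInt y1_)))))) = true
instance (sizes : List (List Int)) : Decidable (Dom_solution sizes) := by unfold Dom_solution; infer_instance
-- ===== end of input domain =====

-- B replaces A's parallel width/height lists, global-max membership test and swap loops by two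
-- direct reductions (max long side × max short side); same return value, simpler decomposition.

-- ===== PORT A =====
-- literal transliteration of A; Pre_solution guarantees the indexing and the max() calls succeed,
-- so pyGetD / .getD defaults are never reached on admitted inputs
def solution (sizes : List (List Int)) : Int :=
  let width := sizes.map (fun i => PySem.List.pyGetD i 0 0)
  let hight := sizes.map (fun i => PySem.List.pyGetD i 1 0)
  let max_length := max ((PySem.List.max? width (fun y => y)).getD 0)
                        ((PySem.List.max? hight (fun y => y)).getD 0)
  if max_length ∈ width then
    -- the in-place swap loop: after it, hight[i] holds the smaller coordinate
    let hight' := (width.zip hight).map (fun p => if p.1 < p.2 then p.1 else p.2)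
    max_length * (PySem.List.max? hight' (fun y => y)).getD 0
  else if max_length ∈ hight then
    -- after this swap loop, width[i] holds the smaller coordinate
    let width' := (width.zip hight).map (fun p => if p.1 > p.2 then p.2 else p.1)
    max_length * (PySem.List.max? width' (fun y => y)).getD 0
  else 0

-- ===== PORT B =====
def solution_alt (sizes : List (List Int)) : Int :=
  let max_long := (PySem.List.max? (sizes.map
      (fun a => max (PySem.List.pyGetD a 0 0) (PySem.List.pyGetD a 1 0))) (fun y => y)).getD 0
  let max_short := (PySem.List.max? (sizes.map
      (fun a => min (PySem.List.pyGetD a 0 0) (PySem.List.pyGetD a 1 0))) (fun y => y)).getD 0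
  max_long * max_short

-- ===== PRECONDITION & SPEC =====
-- A raises on the empty list (ValueError from max([])) and on any row with fewer than two
-- entries (IndexError on i[0]/i[1]); exactly those inputs are excluded.
def Pre_solution (sizes : List (List Int)) : Prop :=
  sizes ≠ [] ∧ ∀ r ∈ sizes, 2 ≤ r.length
instance (sizes : List (List Int)) : Decidable (Pre_solution sizes) := by
  unfold Pre_solution; infer_instance

def pvWitness_solution : List (List Int) := [[60, 50], [30, 70], [60, 30], [80, 40]]

def Spec_solution (sizes : List (List Int)) (out : Int) : Prop := out = solution_alt sizes
instance (sizes : List (List Int)) (out : Int) : Decidable (Spec_solution sizes out) := by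
  unfold Spec_solution; infer_instance

-- ===== CLAIM (what is proved, stated in full; the proofs are below) =====
def Claim_equal_solution : Prop :=
  ∀ (sizes : List (List Int)), Dom_solution sizes → Pre_solution sizes →
    Spec_solution sizes (solution sizes)

-- ===== LEMMAS AND PROOFS =====

lemma foldl_max_pair (l : List (Int × Int)) (a b : Int) :
    max ((l.map Prod.fst).foldl max a) ((l.map Prod.snd).foldl max b)
      = (l.map (fun p => max p.1 p.2)).foldl max (max a b) := by
  induction l generalizing a b with
  | nil => simp
  | cons x t ih => simpa [max_max_max_comm] using ih (max a x.1) (max b x.2)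

lemma foldl_max_mem (l : List Int) (a : Int) :
    l.foldl max a = a ∨ l.foldl max a ∈ l := by
  induction l generalizing a with
  | nil => simp
  | cons x t ih =>
    rw [List.foldl_cons]
    rcases ih (max a x) with h | h
    · rw [h]; rcases max_choice a x with h' | h' <;> simp [h']
    · simp [h]

theorem solution_spec : Claim_equal_solution := by
  intro sizes _hdom hpre
  obtain ⟨hne, _⟩ := hpre
  obtain ⟨r, rs, rfl⟩ := List.exists_cons_of_ne_nil hne
  unfold Spec_solution solution solution_alt
  simp only [List.map_cons, PySem.List.max?_id_cons, Option.getD_some]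
  -- rewrite width.zip hight as a map over the rows
  have hzip : ∀ (h : Int × Int → Int),
      ((rs.map (fun i => PySem.List.pyGetD i 0 0)).zip
        (rs.map (fun i => PySem.List.pyGetD i 1 0))).map h
      = rs.map (fun i => h (PySem.List.pyGetD i 0 0, PySem.List.pyGetD i 1 0)) := by
    intro h
    rw [List.zip_map']
    simp [List.map_map, Function.comp]
  -- both swap-loop bodies compute the per-pair minimum
  have hmin1 : (fun p : Int × Int => if p.1 < p.2 then p.1 else p.2) = fun p => min p.1 p.2 := by
    funext p; rw [min_def]; split_ifs <;> omega
  have hmin2 : (fun p : Int × Int => if p.1 > p.2 then p.2 else p.1) = fun p => min p.1 p.2 := by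
    funext p; rw [min_def]; split_ifs <;> omega
  -- the combined maximum equals B's max_long
  have hM : max ((rs.map (fun i => PySem.List.pyGetD i 0 0)).foldl max (PySem.List.pyGetD r 0 0))
        ((rs.map (fun i => PySem.List.pyGetD i 1 0)).foldl max (PySem.List.pyGetD r 1 0))
      = (rs.map (fun i => max (PySem.List.pyGetD i 0 0) (PySem.List.pyGetD i 1 0))).foldl max
          (max (PySem.List.pyGetD r 0 0) (PySem.List.pyGetD r 1 0)) := by
    have := foldl_max_pair
      (rs.map (fun i => (PySem.List.pyGetD i 0 0, PySem.List.pyGetD i 1 0)))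
      (PySem.List.pyGetD r 0 0) (PySem.List.pyGetD r 1 0)
    simpa [List.map_map, Function.comp] using this
  -- one of the two membership branches is always taken
  have hmem : max ((rs.map (fun i => PySem.List.pyGetD i 0 0)).foldl max (PySem.List.pyGetD r 0 0))
        ((rs.map (fun i => PySem.List.pyGetD i 1 0)).foldl max (PySem.List.pyGetD r 1 0))
        ∈ PySem.List.pyGetD r 0 0 :: rs.map (fun i => PySem.List.pyGetD i 0 0) ∨
      max ((rs.map (fun i => PySem.List.pyGetD i 0 0)).foldl max (PySem.List.pyGetD r 0 0))
        ((rs.map (fun i => PySem.List.pyGetD i 1 0)).foldl max (PySem.List.pyGetD r 1 0))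
        ∈ PySem.List.pyGetD r 1 0 :: rs.map (fun i => PySem.List.pyGetD i 1 0) := by
    rcases max_choice ((rs.map (fun i => PySem.List.pyGetD i 0 0)).foldl max (PySem.List.pyGetD r 0 0))
        ((rs.map (fun i => PySem.List.pyGetD i 1 0)).foldl max (PySem.List.pyGetD r 1 0)) with h | h
    · left; rw [h]
      rcases foldl_max_mem (rs.map (fun i => PySem.List.pyGetD i 0 0)) (PySem.List.pyGetD r 0 0)
        with h' | h' <;> simp [h']
    · right; rw [h]
      rcases foldl_max_mem (rs.map (fun i => PySem.List.pyGetD i 1 0)) (PySem.List.pyGetD r 1 0)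
        with h' | h' <;> simp [h']
  rw [List.zip_cons_cons, List.map_cons, List.map_cons]
  simp only [hzip, hmin1, hmin2, PySem.List.max?_id_cons, Option.getD_some]
  have hfinish : ∀ c : Int,
      c = min (PySem.List.pyGetD r 0 0) (PySem.List.pyGetD r 1 0) →
      (rs.map (fun i => max (PySem.List.pyGetD i 0 0) (PySem.List.pyGetD i 1 0))).foldl max
          (max (PySem.List.pyGetD r 0 0) (PySem.List.pyGetD r 1 0)) *
        (rs.map (fun i => min (PySem.List.pyGetD i 0 0) (PySem.List.pyGetD i 1 0))).foldl max c
      = (rs.map (fun a => max (PySem.List.pyGetD a 0 0) (PySem.List.pyGetD a 1 0))).foldl max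
          (max (PySem.List.pyGetD r 0 0) (PySem.List.pyGetD r 1 0)) *
        (rs.map (fun a => min (PySem.List.pyGetD a 0 0) (PySem.List.pyGetD a 1 0))).foldl max
          (min (PySem.List.pyGetD r 0 0) (PySem.List.pyGetD r 1 0)) := by
    intro c hc; rw [hc]
  rcases hmem with h | h
  · rw [if_pos h, hM]
    exact hfinish _ (by rw [min_def]; split_ifs <;> omega)
  · by_cases h1 : max ((rs.map (fun i => PySem.List.pyGetD i 0 0)).foldl max (PySem.List.pyGetD r 0 0))
        ((rs.map (fun i => PySem.List.pyGetD i 1 0)).foldl max (PySem.List.pyGetD r 1 0))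
        ∈ PySem.List.pyGetD r 0 0 :: rs.map (fun i => PySem.List.pyGetD i 0 0)
    · rw [if_pos h1, hM]
      exact hfinish _ (by rw [min_def]; split_ifs <;> omega)
    · rw [if_neg h1, if_pos h, hM]
      exact hfinish _ (by rw [min_def]; split_ifs <;> omega)
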